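-- pv_equiv track=rewrite | github.com/gaplanelles/RAG_AVATAR | RAG/src/api/routes.py | has_consecutive_repetition
-- ===== SOURCE A (Python) =====
-- def has_consecutive_repetition(text: str, k: int = 10) -> bool:
--     """
--     Check if there is a consecutive repetition of at least k characters in the text.
--     Uses suffix arrays to find all possible repetitions.
--     """
--     n = len(text)
--     if n < 2*k:
--         return False
--
--     # Create suffix array
--     suffixes = [(text[i:], i) for i in range(n)]
--     suffixes.sort()
--
--     # Compare consecutive suffixes to find common prefixes
--     for i in range(n-1):
--         s1, pos1 = suffixes[i]
--         s2, pos2 = suffixes[i+1]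
--
--         # Find length of common prefix
--         common_len = 0
--         while common_len < len(s1) and common_len < len(s2) and s1[common_len] == s2[common_len]:
--             common_len += 1
--
--         # Check if it's a consecutive repetition
--         if common_len >= k and abs(pos1 - pos2) == common_len:
--             return True
--
--     return False
-- ===== SOURCE B (Python) =====
-- def has_consecutive_repetition(text: str, k: int = 10) -> bool:
--     n = len(text)
--     if n < 2 * k:
--         return False
--     # suffix array + Kasai LCP array
--     sa = sorted(range(n), key=lambda i: text[i:])
--     rank = {p: r for r, p in enumerate(sa)}
--     lcp = {}
--     h = 0
--     for i in range(n):
--         r = rank[i]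
--         if r > 0:
--             j = sa[r - 1]
--             while i + h < n and j + h < n and text[i + h] == text[j + h]:
--                 h += 1
--             lcp[r] = h
--             if h > 0:
--                 h -= 1
--         else:
--             h = 0
--     return any(lcp.get(r, 0) >= k and abs(sa[r] - sa[r - 1]) == lcp.get(r, 0)
--                for r in range(1, n))
-- ===== Notes on version B (the rewrite author's own statement) =====
-- stated objective: alternative
-- what changed: B builds a suffix array of indices and computes all adjacent-pair LCP values with Kasai's amortized algorithm (one h-carrying pass over text positions via an inverse-rank table), instead of A's per-adjacent-pair character-by-character prefix scan over sorted suffix strings; the suffix sort itself remains the dominant cost in both.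
import Mathlib
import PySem

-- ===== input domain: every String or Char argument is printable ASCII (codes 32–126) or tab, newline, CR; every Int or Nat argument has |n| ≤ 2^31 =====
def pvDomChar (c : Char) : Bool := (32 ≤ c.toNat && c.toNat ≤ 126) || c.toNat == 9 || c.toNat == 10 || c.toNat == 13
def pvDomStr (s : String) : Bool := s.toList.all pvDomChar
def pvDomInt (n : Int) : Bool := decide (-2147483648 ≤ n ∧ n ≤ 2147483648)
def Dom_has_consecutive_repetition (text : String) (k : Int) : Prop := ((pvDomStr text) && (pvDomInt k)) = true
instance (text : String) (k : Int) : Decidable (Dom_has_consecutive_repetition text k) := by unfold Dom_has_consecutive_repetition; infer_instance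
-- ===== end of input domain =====

-- B computes the adjacent-suffix LCP values with Kasai's amortized algorithm over a suffix
-- array of indices, instead of A's per-pair character-by-character scan over sorted suffix
-- strings (objective: alternative, same results).

-- ===== PORT A =====
-- A's inner while loop: count the length of the common prefix of two suffixes
def commonLenAux : List Char → List Char → Nat
  | a :: as, b :: bs => if a = b then commonLenAux as bs + 1 else 0
  | _, _ => 0

def has_consecutive_repetition (text : String) (k : Int) : Bool :=
  let tL := text.toList
  let n : Int := tL.length
  if n < 2 * k then false
  else
    let suffixes := (PySem.List.pyRange 0 n 1).map (fun i => (PySem.List.slice tL (some i) none, i))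
    let srt := PySem.List.sorted2 suffixes (fun pr => pr.1) (fun pr => pr.2)
    (PySem.List.pyRange 0 (n - 1) 1).any (fun i =>
      let pr1 := PySem.List.pyGetD srt i ([], 0)
      let pr2 := PySem.List.pyGetD srt (i + 1) ([], 0)
      let c := commonLenAux pr1.1 pr2.1
      decide (k ≤ (c : Int) ∧ (pr1.2 - pr2.2).natAbs = c))

-- ===== PORT B =====
-- B's Kasai while loop: 'while i+h<n and j+h<n and text[i+h]==text[j+h]: h += 1'
-- (the guard keeps both indices in range, so the defaulted reads are exact there)
def kasaiExtend (tL : List Char) (i j : Int) (h : Int) : Int :=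
  if c : i + h < (tL.length : Int) ∧ j + h < (tL.length : Int) ∧
      PySem.List.pyGetD tL (i + h) ' ' = PySem.List.pyGetD tL (j + h) ' ' then
    kasaiExtend tL i j (h + 1)
  else h
termination_by ((tL.length : Int) - (i + h)).toNat
decreasing_by omega

def has_consecutive_repetition_alt (text : String) (k : Int) : Bool :=
  let tL := text.toList
  let n : Int := tL.length
  if n < 2 * k then false
  else
    let sa := PySem.List.sorted (PySem.List.pyRange 0 n 1)
      (fun i => PySem.List.slice tL (some i) none) false
    -- rank = {p: r for r, p in enumerate(sa)}
    let rank := (PySem.List.enumerate sa).foldl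
      (fun d rp => d.insert rp.2 rp.1) (PySem.Dict.empty (κ := Int) (ν := Int))
    -- the Kasai loop, carrying (h, lcp); 'rank[i]' and 'sa[r-1]' always hit, so the
    -- defaulted lookups are exact
    let hl := (PySem.List.pyRange 0 n 1).foldl
      (fun st i =>
        let r := rank.getD i 0
        if 0 < r then
          let j := PySem.List.pyGetD sa (r - 1) 0
          let h := kasaiExtend tL i j st.1
          (if 0 < h then h - 1 else h, st.2.insert r h)
        else (0, st.2))
      ((0 : Int), (PySem.Dict.empty (κ := Int) (ν := Int)))
    (PySem.List.pyRange 1 n 1).any (fun r =>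
      decide (k ≤ hl.2.getD r 0 ∧
        ((PySem.List.pyGetD sa r 0 - PySem.List.pyGetD sa (r - 1) 0).natAbs : Int) = hl.2.getD r 0))

-- ===== PRECONDITION & SPEC =====
def Spec_has_consecutive_repetition (text : String) (k : Int) (out : Bool) : Prop := out = has_consecutive_repetition_alt text k
instance (text : String) (k : Int) (out : Bool) : Decidable (Spec_has_consecutive_repetition text k out) := by unfold Spec_has_consecutive_repetition; infer_instance

-- ===== CLAIM (what is proved, stated in full; the proofs are below) =====
def Claim_equal_has_consecutive_repetition : Prop := ∀ (text : String) (k : Int), Dom_has_consecutive_repetition text k → Spec_has_consecutive_repetition text k (has_consecutive_repetition text k)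

-- ===== LEMMAS AND PROOFS =====

theorem drop_inj (tL : List Char) (a b : Nat) (ha : a < tL.length) (hb : b < tL.length)
    (h : tL.drop a = tL.drop b) : a = b := by
  have := congrArg List.length h
  simp [List.length_drop] at this
  omega

theorem insertBy_cons {α : Type} (bf : α → α → Bool) (x y : α) (ys : List α) :
    PySem.List.insertBy bf x (y :: ys) =
      if bf x y then x :: y :: ys else y :: PySem.List.insertBy bf x ys := by
  rfl

theorem insertBy_congr {α : Type} (bf bf' : α → α → Bool) (x : α) (acc : List α)
    (h : ∀ y ∈ acc, bf x y = bf' x y) :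
    PySem.List.insertBy bf x acc = PySem.List.insertBy bf' x acc := by
  induction acc with
  | nil => rfl
  | cons y ys ih =>
    rw [insertBy_cons, insertBy_cons, h y (by simp)]
    by_cases hb : bf' x y = true
    · simp [hb]
    · simp only [Bool.not_eq_true] at hb
      simp [hb, ih (fun z hz => h z (by simp [hz]))]

theorem foldl_insertBy_congr {α : Type} (bf bf' : α → α → Bool) (l acc : List α)
    (h : ∀ a ∈ l, ∀ b, (b ∈ acc ∨ b ∈ l) → bf a b = bf' a b) :
    l.foldl (fun acc x => PySem.List.insertBy bf x acc) acc
      = l.foldl (fun acc x => PySem.List.insertBy bf' x acc) acc := by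
  induction l generalizing acc with
  | nil => rfl
  | cons x xs ih =>
    simp only [List.foldl_cons]
    rw [insertBy_congr bf bf' x acc (fun y hy => h x (by simp) y (Or.inl hy))]
    exact ih (PySem.List.insertBy bf' x acc)
      (fun a ha b hb => h a (by simp [ha]) b (by
        rcases hb with hb | hb
        · rw [PySem.List.mem_insertBy] at hb
          rcases hb with rfl | hb
          · exact Or.inr (by simp)
          · exact Or.inl hb
        · exact Or.inr (by simp [hb])))

def sfxs (tL : List Char) : List (List Char × Int) :=
  (List.range tL.length).map (fun j => (tL.drop j, (j : Int)))
def Ssort (tL : List Char) : List (List Char × Int) :=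
  PySem.List.sorted (sfxs tL) (fun pr => pr.1) false

theorem mem_sfxs (tL : List Char) (x : List Char × Int) :
    x ∈ sfxs tL ↔ ∃ j, j < tL.length ∧ x = (tL.drop j, (j : Int)) := by
  simp [sfxs, List.mem_map, List.mem_range, eq_comm]

theorem nodup_sfxs (tL : List Char) : (sfxs tL).Nodup := by
  refine List.Nodup.map ?_ (List.nodup_range)
  intro a b hab
  simpa using congrArg Prod.snd hab

theorem sorted2_eq_Ssort (tL : List Char) :
    PySem.List.sorted2 (sfxs tL) (fun pr => pr.1) (fun pr => pr.2) = Ssort tL := by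
  unfold PySem.List.sorted2 Ssort PySem.List.sorted
  simp only [if_neg (by decide : ¬ (false = true))]
  apply foldl_insertBy_congr
  intro a ha b hb
  have hb' : b ∈ sfxs tL := by tauto
  rw [mem_sfxs] at ha hb'
  obtain ⟨i, hi, ha2⟩ := ha
  obtain ⟨j, hj, hb2⟩ := hb'
  subst ha2; subst hb2
  rcases lt_trichotomy (tL.drop i) (tL.drop j) with h | h | h
  · simp [h, le_of_lt h, not_lt_of_gt h]
  · have : i = j := drop_inj tL i j hi hj h
    subst this
    simp [h, lt_irrefl]
  · simp [h, not_lt_of_gt h, le_of_lt h]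

theorem sorted_inst_bridge (xs : List (List Char × Int)) :
    PySem.List.sorted xs (fun pr => pr.1) false
      = @PySem.List.sorted (List Char × Int) (List Char) List.instLinearOrder.toLT
          LinearOrder.toDecidableLT xs (fun pr => pr.1) false := by
  unfold PySem.List.sorted
  simp only [if_neg (by decide : ¬ (false = true))]
  apply foldl_insertBy_congr
  intro a _ b _
  exact decide_eq_decide.mpr Iff.rfl

theorem length_Ssort (tL : List Char) : (Ssort tL).length = tL.length := by
  have := (PySem.List.sorted_perm (sfxs tL) (fun pr => pr.1) false).length_eq
  simpa [sfxs, Ssort] using this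

theorem mem_Ssort (tL : List Char) (x : List Char × Int) :
    x ∈ Ssort tL ↔ ∃ j, j < tL.length ∧ x = (tL.drop j, (j : Int)) := by
  rw [← mem_sfxs]
  exact (PySem.List.sorted_perm (sfxs tL) (fun pr => pr.1) false).mem_iff

theorem nodup_Ssort (tL : List Char) : (Ssort tL).Nodup := by
  exact ((PySem.List.sorted_perm (sfxs tL) (fun pr => pr.1) false).nodup_iff).mpr (nodup_sfxs tL)

theorem strict_Ssort (tL : List Char) :
    ∀ i j (hi : i < (Ssort tL).length) (hj : j < (Ssort tL).length), i < j →
      ((Ssort tL)[i]).1 < ((Ssort tL)[j]).1 := by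
  intro i j hi hj hij
  have hle : ((Ssort tL)[i]).1 ≤ ((Ssort tL)[j]).1 := by
    have hp := PySem.List.sorted_pairwise (sfxs tL) (fun pr => pr.1)
    rw [← sorted_inst_bridge] at hp
    rw [List.pairwise_iff_getElem] at hp
    exact hp i j hi hj hij
  rcases lt_or_eq_of_le hle with h | h
  · exact h
  · exfalso
    have hmi := (mem_Ssort tL _).mp (List.getElem_mem hi)
    have hmj := (mem_Ssort tL _).mp (List.getElem_mem hj)
    obtain ⟨a, han, hai⟩ := hmi
    obtain ⟨b, hbn, hbj⟩ := hmj
    have hab : a = b := by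
      apply drop_inj tL a b han hbn
      have := h
      rw [hai, hbj] at this
      exact this
    subst hab
    have : (Ssort tL)[i] = (Ssort tL)[j] := by rw [hai, hbj]
    have := (List.Nodup.getElem_inj_iff (nodup_Ssort tL)).mp this
    omega

-- text position of the r-th suffix in sorted order, and its inverse
def saPos (tL : List Char) (r : Nat) : Nat := (((Ssort tL).getD r ([], 0)).2).toNat
def rankOf (tL : List Char) (i : Nat) : Nat := ((Ssort tL).map Prod.snd).idxOf (i : Int)

theorem Ssort_getElem (tL : List Char) (r : Nat) (hr : r < tL.length) :
    (Ssort tL)[r]'(by rw [length_Ssort]; exact hr) = (tL.drop (saPos tL r), (saPos tL r : Int)) := by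
  have hr' : r < (Ssort tL).length := by rw [length_Ssort]; exact hr
  obtain ⟨j, hj, he⟩ := (mem_Ssort tL _).mp (List.getElem_mem hr')
  have hs : saPos tL r = j := by
    unfold saPos
    rw [List.getD_eq_getElem _ _ hr', he]
    simp
  rw [hs]
  exact he

theorem saPos_lt (tL : List Char) (r : Nat) (hr : r < tL.length) : saPos tL r < tL.length := by
  have hr' : r < (Ssort tL).length := by rw [length_Ssort]; exact hr
  obtain ⟨j, hj, he⟩ := (mem_Ssort tL _).mp (List.getElem_mem hr')
  have hs : saPos tL r = j := by
    unfold saPos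
    rw [List.getD_eq_getElem _ _ hr', he]
    simp
  omega

theorem saPos_strict (tL : List Char) (r s : Nat) (hr : r < s) (hs : s < tL.length) :
    tL.drop (saPos tL r) < tL.drop (saPos tL s) := by
  have h := strict_Ssort tL r s (by rw [length_Ssort]; omega) (by rw [length_Ssort]; exact hs) hr
  rwa [Ssort_getElem tL r (by omega), Ssort_getElem tL s hs] at h

theorem nodup_sa (tL : List Char) : ((Ssort tL).map Prod.snd).Nodup := by
  refine List.Nodup.map_on ?_ (nodup_Ssort tL)
  intro x hx y hy hxy
  obtain ⟨a, han, rfl⟩ := (mem_Ssort tL x).mp hx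
  obtain ⟨b, hbn, rfl⟩ := (mem_Ssort tL y).mp hy
  simp only [Prod.snd] at hxy
  have : a = b := by exact_mod_cast hxy
  subst this
  rfl

theorem rankOf_lt (tL : List Char) (i : Nat) (hi : i < tL.length) : rankOf tL i < tL.length := by
  have hm : ((i : Int)) ∈ (Ssort tL).map Prod.snd := by
    refine List.mem_map.mpr ⟨(tL.drop i, (i : Int)), ?_, rfl⟩
    exact (mem_Ssort tL _).mpr ⟨i, hi, rfl⟩
  have := List.idxOf_lt_length_of_mem hm
  unfold rankOf
  rwa [List.length_map, length_Ssort] at this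

theorem saPos_rankOf (tL : List Char) (i : Nat) (hi : i < tL.length) : saPos tL (rankOf tL i) = i := by
  have hm : ((i : Int)) ∈ (Ssort tL).map Prod.snd := by
    refine List.mem_map.mpr ⟨(tL.drop i, (i : Int)), ?_, rfl⟩
    exact (mem_Ssort tL _).mpr ⟨i, hi, rfl⟩
  have hrlt : rankOf tL i < tL.length := rankOf_lt tL i hi
  have hidx : ((Ssort tL).map Prod.snd)[rankOf tL i]'(by rw [List.length_map, length_Ssort]; exact hrlt)
      = ((i : Nat) : Int) := List.getElem_idxOf (List.idxOf_lt_length_of_mem hm)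
  have hb : ((Ssort tL).map Prod.snd)[rankOf tL i]'(by rw [List.length_map, length_Ssort]; exact hrlt)
      = ((Ssort tL)[rankOf tL i]'(by rw [length_Ssort]; exact hrlt)).2 := by
    simp [List.getElem_map]
  rw [hb, Ssort_getElem tL _ hrlt] at hidx
  simp only [Prod.snd] at hidx
  exact_mod_cast hidx

theorem rankOf_saPos (tL : List Char) (r : Nat) (hr : r < tL.length) : rankOf tL (saPos tL r) = r := by
  have hb : ((Ssort tL).map Prod.snd)[r]'(by rw [List.length_map, length_Ssort]; exact hr)
      = ((saPos tL r : Nat) : Int) := by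
    rw [List.getElem_map, Ssort_getElem tL r hr]
  have := List.Nodup.idxOf_getElem (nodup_sa tL) r (by rw [List.length_map, length_Ssort]; exact hr)
  unfold rankOf
  rw [← hb]
  exact this

theorem rankOf_strict (tL : List Char) (a b : Nat) (ha : a < tL.length) (hb : b < tL.length)
    (h : tL.drop a < tL.drop b) : rankOf tL a < rankOf tL b := by
  rcases lt_trichotomy (rankOf tL a) (rankOf tL b) with hlt | he | hgt
  · exact hlt
  · exfalso
    have := congrArg (saPos tL) he
    rw [saPos_rankOf tL a ha, saPos_rankOf tL b hb] at this
    subst this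
    exact absurd h (lt_irrefl _)
  · exfalso
    have := saPos_strict tL (rankOf tL b) (rankOf tL a) hgt (rankOf_lt tL a ha)
    rw [saPos_rankOf tL a ha, saPos_rankOf tL b hb] at this
    exact absurd (lt_trans h this) (lt_irrefl _)

-- ---- commonLenAux facts ----
theorem clen_nil_right (u : List Char) : commonLenAux u [] = 0 := by
  cases u <;> rfl

theorem clen_le_left (u v : List Char) : commonLenAux u v ≤ u.length := by
  induction u generalizing v with
  | nil => simp [commonLenAux]
  | cons a as ih =>
    cases v with
    | nil => simp [commonLenAux]
    | cons b bs =>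
      by_cases h : a = b
      · simp only [commonLenAux, if_pos h, List.length_cons]
        exact Nat.succ_le_succ (ih bs)
      · simp [commonLenAux, h]

theorem clen_comm (u v : List Char) : commonLenAux u v = commonLenAux v u := by
  induction u generalizing v with
  | nil => cases v <;> simp [commonLenAux]
  | cons a as ih =>
    cases v with
    | nil => simp [commonLenAux]
    | cons b bs =>
      by_cases h : a = b
      · subst h; simp [commonLenAux, ih]
      · simp [commonLenAux, h, Ne.symm h]

theorem clen_cons (a b : Char) (u v : List Char) :
    commonLenAux (a :: u) (b :: v) = if a = b then commonLenAux u v + 1 else 0 := rfl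

-- characters strictly before the lcp agree (and are in range)
theorem clen_lt_char (u v : List Char) (m : Nat) (hm : m < commonLenAux u v) :
    ∃ (hu : m < u.length) (hv : m < v.length), u[m] = v[m] := by
  induction u generalizing v m with
  | nil => simp [commonLenAux] at hm
  | cons a as ih =>
    cases v with
    | nil => simp [commonLenAux] at hm
    | cons b bs =>
      by_cases h : a = b
      · rw [clen_cons, if_pos h] at hm
        cases m with
        | zero => exact ⟨by simp, by simp, h⟩
        | succ m' =>
          obtain ⟨hu, hv, he⟩ := ih bs m' (by omega)
          exact ⟨by simpa using Nat.succ_lt_succ hu, by simpa using Nat.succ_lt_succ hv, by simpa using he⟩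
      · rw [clen_cons, if_neg h] at hm; omega

-- at the lcp position (if both in range) the characters differ
theorem clen_stop (u v : List Char) (hu : commonLenAux u v < u.length)
    (hv : commonLenAux u v < v.length) :
    u.getD (commonLenAux u v) ' ' ≠ v.getD (commonLenAux u v) ' ' := by
  induction u generalizing v with
  | nil => simp at hu
  | cons a as ih =>
    cases v with
    | nil => simp at hv
    | cons b bs =>
      by_cases h : a = b
      · subst h
        rw [clen_cons, if_pos rfl] at hu hv ⊢
        simp only [List.length_cons] at hu hv
        simpa using ih bs (by omega) (by omega)
      · rw [clen_cons, if_neg h] at hu hv ⊢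
        simpa using h

-- lcp monotone along lexicographic order: u ≤ v ≤ w → lcp u w ≤ lcp v w
theorem clen_mono (u v w : List Char) (huv : u ≤ v) (hvw : v ≤ w) :
    commonLenAux u w ≤ commonLenAux v w := by
  induction u generalizing v w with
  | nil => simp [commonLenAux]
  | cons a as ih =>
    cases w with
    | nil => simp [clen_nil_right]
    | cons c ws =>
      by_cases hac : a = c
      · subst hac
        cases v with
        | nil =>
          exfalso
          rcases le_iff_lt_or_eq.mp huv with h | h
          · exact List.not_lt_nil _ h
          · simp at h
        | cons b vs =>
          rcases le_iff_lt_or_eq.mp huv with h | h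
          · rcases List.cons_lt_cons_iff.mp h with h1 | ⟨h1, h2⟩
            · -- a < b ; with b ≤ a from v ≤ w head: derive b = a? need v ≤ w analysis
              rcases le_iff_lt_or_eq.mp hvw with h3 | h3
              · rcases List.cons_lt_cons_iff.mp h3 with h4 | ⟨h4, h5⟩
                · exact absurd (lt_trans h1 h4) (lt_irrefl a)
                · subst h4
                  exact absurd h1 (lt_irrefl _)
              · have hb : b = a := (List.cons.injEq _ _ _ _ ▸ h3).1
                subst hb
                exact absurd h1 (lt_irrefl _)
            · subst h1
              rcases le_iff_lt_or_eq.mp hvw with h3 | h3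
              · rcases List.cons_lt_cons_iff.mp h3 with h4 | ⟨h4, h5⟩
                · exact absurd h4 (lt_irrefl _)
                · rw [clen_cons, clen_cons, if_pos rfl, if_pos rfl]
                  exact Nat.succ_le_succ (ih vs ws (le_of_lt h2) (le_of_lt h5))
              · have : vs = ws := (List.cons.injEq _ _ _ _ ▸ h3).2
                subst this
                rw [clen_cons, clen_cons, if_pos rfl, if_pos rfl]
                exact Nat.succ_le_succ (ih vs vs (le_of_lt h2) le_rfl)
          · -- u = v
            exact h ▸ le_rfl
      · rw [clen_cons, if_neg hac]
        exact Nat.zero_le _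

-- lcp of the two suffixes adjacent in suffix order, Nat-indexed by the right rank
def lcpAt (tL : List Char) (r : Nat) : Nat :=
  commonLenAux (tL.drop (saPos tL (r - 1))) (tL.drop (saPos tL r))

theorem clen_drop_shift (tL : List Char) (p m : Nat) (hp : p < tL.length) (hm : m < tL.length)
    (hhead : tL[p] = tL[m]) :
    commonLenAux (tL.drop p) (tL.drop m) = commonLenAux (tL.drop (p+1)) (tL.drop (m+1)) + 1 := by
  rw [← List.getElem_cons_drop hp, ← List.getElem_cons_drop hm, clen_cons, if_pos hhead]

-- THE KASAI LEMMA: the lcp with the predecessor drops by at most one when moving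
-- from text position m to m+1
theorem kasai_key (tL : List Char) (m : Nat) (hm1 : m + 1 < tL.length)
    (hrm : 1 ≤ rankOf tL m) (hrm1 : 1 ≤ rankOf tL (m + 1)) :
    lcpAt tL (rankOf tL m) - 1 ≤ lcpAt tL (rankOf tL (m + 1)) := by
  have hmN : m < tL.length := by omega
  set rm := rankOf tL m with hrmdef
  set p := saPos tL (rm - 1) with hpdef
  have hrmN : rm < tL.length := rankOf_lt tL m hmN
  have hsp : saPos tL rm = m := saPos_rankOf tL m hmN
  have hL : lcpAt tL rm = commonLenAux (tL.drop p) (tL.drop m) := by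
    unfold lcpAt
    rw [hsp]
  rcases Nat.lt_or_ge (lcpAt tL rm) 2 with hsmall | hbig
  · omega
  · have hpN : p < tL.length := saPos_lt tL (rm - 1) (by omega)
    have hord : tL.drop p < tL.drop m := by
      have := saPos_strict tL (rm - 1) rm (by omega) hrmN
      rwa [hsp] at this
    obtain ⟨hu0, hv0, hhead0⟩ := clen_lt_char (tL.drop p) (tL.drop m) 0 (by omega)
    have hhead : tL[p]'hpN = tL[m]'hmN := by
      rw [List.getElem_drop, List.getElem_drop] at hhead0
      simpa using hhead0
    have hshift : commonLenAux (tL.drop p) (tL.drop m)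
        = commonLenAux (tL.drop (p+1)) (tL.drop (m+1)) + 1 :=
      clen_drop_shift tL p m hpN hmN hhead
    have hp1N : p + 1 < tL.length := by
      by_contra hcon
      have : tL.drop (p+1) = [] := List.drop_eq_nil_of_le (by omega)
      rw [this] at hshift
      simp [commonLenAux] at hshift
      omega
    have htail : tL.drop (p+1) < tL.drop (m+1) := by
      rw [← List.getElem_cons_drop hpN, ← List.getElem_cons_drop hmN] at hord
      rcases List.cons_lt_cons_iff.mp hord with h1 | ⟨_, h2⟩
      · rw [hhead] at h1
        exact absurd h1 (lt_irrefl _)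
      · exact h2
    have hr1 : rankOf tL (p+1) < rankOf tL (m+1) := rankOf_strict tL (p+1) (m+1) hp1N hm1 htail
    have hrm1N : rankOf tL (m+1) < tL.length := rankOf_lt tL (m+1) hm1
    set q := saPos tL (rankOf tL (m+1) - 1) with hqdef
    have hle1 : tL.drop (p+1) ≤ tL.drop q := by
      rcases Nat.lt_or_ge (rankOf tL (p+1)) (rankOf tL (m+1) - 1) with hlt | hge
      · have := saPos_strict tL (rankOf tL (p+1)) (rankOf tL (m+1) - 1) hlt (by omega)
        rw [saPos_rankOf tL (p+1) hp1N] at this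
        exact le_of_lt this
      · have heq : rankOf tL (p+1) = rankOf tL (m+1) - 1 := by omega
        rw [hqdef, ← heq, saPos_rankOf tL (p+1) hp1N]
    have hlt2 : tL.drop q < tL.drop (m+1) := by
      have := saPos_strict tL (rankOf tL (m+1) - 1) (rankOf tL (m+1)) (by omega) hrm1N
      rwa [saPos_rankOf tL (m+1) hm1] at this
    have hmono := clen_mono (tL.drop (p+1)) (tL.drop q) (tL.drop (m+1)) hle1 (le_of_lt hlt2)
    have hL1 : lcpAt tL (rankOf tL (m+1)) = commonLenAux (tL.drop q) (tL.drop (m+1)) := by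
      unfold lcpAt
      rw [saPos_rankOf tL (m+1) hm1]
    omega

-- kasaiExtend computes the exact lcp once started at or below it
theorem getD_drop (tL : List Char) (p m : Nat) (hm : p + m < tL.length) :
    (tL.drop p).getD m ' ' = tL.getD (p + m) ' ' := by
  rw [List.getD_eq_getElem _ _ (by rw [List.length_drop]; omega),
      List.getD_eq_getElem _ _ hm]
  simp

theorem kasaiExtend_eq (tL : List Char) (i j : Nat) (h : Nat)
    (hle : h ≤ commonLenAux (tL.drop i) (tL.drop j)) :
    kasaiExtend tL i j h = (commonLenAux (tL.drop i) (tL.drop j) : Int) := by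
  set C := commonLenAux (tL.drop i) (tL.drop j) with hC
  have hCi : C ≤ tL.length - i := by
    have := clen_le_left (tL.drop i) (tL.drop j)
    rwa [List.length_drop] at this
  have hCj : C ≤ tL.length - j := by
    have h2 : commonLenAux (tL.drop j) (tL.drop i) ≤ (tL.drop j).length :=
      clen_le_left (tL.drop j) (tL.drop i)
    rwa [List.length_drop, ← clen_comm, ← hC] at h2
  have H : ∀ m : Nat, ∀ hh : Nat, hh ≤ C → C - hh = m →
      kasaiExtend tL i j hh = (C : Int) := by
    intro m
    induction m with
    | zero =>
      intro hh hhle hm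
      have hhC : hh = C := by omega
      subst hhC
      rw [kasaiExtend, dif_neg]
      push_neg
      intro h1 h2
      have hiC : i + C < tL.length := by exact_mod_cast (by push_cast at h1 ⊢; omega : ((i + C : Nat) : Int) < (tL.length : Int))
      have hjC : j + C < tL.length := by exact_mod_cast (by push_cast at h2 ⊢; omega : ((j + C : Nat) : Int) < (tL.length : Int))
      have hstop := clen_stop (tL.drop i) (tL.drop j)
        (by rw [List.length_drop]; omega) (by rw [List.length_drop]; omega)
      rw [← hC, getD_drop tL i C hiC, getD_drop tL j C hjC] at hstop
      rw [show (i : Int) + (C : Int) = ((i + C : Nat) : Int) by push_cast; ring,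
          show (j : Int) + (C : Int) = ((j + C : Nat) : Int) by push_cast; ring,
          PySem.List.pyGetD_natCast, PySem.List.pyGetD_natCast]
      exact hstop
    | succ m ih =>
      intro hh hhle hm
      have hhC : hh < C := by omega
      obtain ⟨hu, hv, he⟩ := clen_lt_char (tL.drop i) (tL.drop j) hh (by rw [← hC]; omega)
      rw [List.length_drop] at hu hv
      rw [kasaiExtend, dif_pos]
      · rw [show ((hh : Int) + 1) = ((hh + 1 : Nat) : Int) by push_cast; ring]
        exact ih (hh + 1) (by omega) (by omega)
      · refine ⟨by push_cast; omega, by push_cast; omega, ?_⟩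
        rw [show (i : Int) + (hh : Int) = ((i + hh : Nat) : Int) by push_cast; ring,
            show (j : Int) + (hh : Int) = ((j + hh : Nat) : Int) by push_cast; ring,
            PySem.List.pyGetD_natCast, PySem.List.pyGetD_natCast,
            ← getD_drop tL i hh (by omega), ← getD_drop tL j hh (by omega)]
        rw [List.getD_eq_getElem _ _ (by rw [List.length_drop]; omega),
            List.getD_eq_getElem _ _ (by rw [List.length_drop]; omega)]
        exact he
  exact H (C - h) h hle rfl

-- ---- the suffix array of indices and the rank dictionary, as B builds them ----
def saB (tL : List Char) : List Int := (Ssort tL).map Prod.snd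

def rankD (tL : List Char) : PySem.Dict Int Int :=
  (PySem.List.enumerate (saB tL)).foldl (fun d rp => d.insert rp.2 rp.1)
    (PySem.Dict.empty (κ := Int) (ν := Int))

def kasaiF (tL : List Char) : (Int × PySem.Dict Int Int) → Int → (Int × PySem.Dict Int Int) :=
  fun st i =>
    let r := (rankD tL).getD i 0
    if 0 < r then
      let j := PySem.List.pyGetD (saB tL) (r - 1) 0
      let h := kasaiExtend tL i j st.1
      (if 0 < h then h - 1 else h, st.2.insert r h)
    else (0, st.2)

def kasaiG (tL : List Char) (m : Nat) : Int × PySem.Dict Int Int :=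
  (PySem.List.pyRange 0 (m : Int) 1).foldl (kasaiF tL) ((0 : Int), PySem.Dict.empty)

theorem length_saB (tL : List Char) : (saB tL).length = tL.length := by
  unfold saB
  rw [List.length_map, length_Ssort]

theorem saB_getElem (tL : List Char) (r : Nat) (hr : r < tL.length) :
    (saB tL)[r]'(by rw [length_saB]; exact hr) = (saPos tL r : Int) := by
  unfold saB
  rw [List.getElem_map, Ssort_getElem tL r hr]

theorem pyGetD_saB (tL : List Char) (r : Nat) (hr : r < tL.length) :
    PySem.List.pyGetD (saB tL) (r : Int) 0 = (saPos tL r : Int) := by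
  rw [PySem.List.pyGetD_natCast,
      List.getD_eq_getElem _ _ (by rw [length_saB]; exact hr), saB_getElem tL r hr]

theorem sorted_key_inst_bridge {α : Type} (xs : List α) (key : α → List Char) :
    PySem.List.sorted xs key false
      = @PySem.List.sorted α (List Char) List.instLinearOrder.toLT
          LinearOrder.toDecidableLT xs key false := by
  unfold PySem.List.sorted
  simp only [if_neg (by decide : ¬ (false = true))]
  apply foldl_insertBy_congr
  intro a _ b _
  exact decide_eq_decide.mpr Iff.rfl

theorem sa_eq (tL : List Char) :
    PySem.List.sorted (PySem.List.pyRange 0 (tL.length : Int) 1)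
      (fun i => PySem.List.slice tL (some i) none) false = saB tL := by
  rw [sorted_key_inst_bridge]
  apply PySem.List.sorted_eq_of_perm_of_pairwise_lt
  · -- (saB tL).Perm (pyRange 0 n 1)
    have h1 : (saB tL).Perm ((sfxs tL).map Prod.snd) :=
      List.Perm.map Prod.snd (PySem.List.sorted_perm (sfxs tL) (fun pr => pr.1) false)
    have h2 : (sfxs tL).map Prod.snd = PySem.List.pyRange 0 (tL.length : Int) 1 := by
      rw [sfxs, List.map_map, PySem.List.pyRange_one]
      simp [Function.comp]
    rw [← h2]
    exact h1
  · rw [List.pairwise_iff_getElem]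
    intro a b ha hb hab
    rw [length_saB] at ha hb
    rw [saB_getElem tL a (by omega), saB_getElem tL b hb]
    have := saPos_strict tL a b hab hb
    rwa [PySem.List.slice_from_natCast, PySem.List.slice_from_natCast]

-- ---- the rank dictionary reads back the suffix-array index ----
theorem rankFold_not_mem (l : List Int) (d : PySem.Dict Int Int) (s : Int) (q : Int)
    (hq : q ∉ l) :
    ((PySem.List.enumerate l s).foldl (fun d rp => d.insert rp.2 rp.1) d).getD q 0 = d.getD q 0 := by
  induction l generalizing d s with
  | nil => rfl
  | cons x xs ih =>
    rw [PySem.List.enumerate_cons, List.foldl_cons]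
    rw [ih _ _ (by intro h; exact hq (by simp [h]))]
    rw [PySem.Dict.getD_insert, if_neg (by intro h; exact hq (by simp [h]))]

theorem rankFold_getElem (l : List Int) (hnd : l.Nodup) (d : PySem.Dict Int Int) (s : Int)
    (r : Nat) (hr : r < l.length) :
    ((PySem.List.enumerate l s).foldl (fun d rp => d.insert rp.2 rp.1) d).getD (l[r]) 0
      = s + r := by
  induction l generalizing d s r with
  | nil => simp at hr
  | cons x xs ih =>
    rw [PySem.List.enumerate_cons, List.foldl_cons]
    cases r with
    | zero =>
      rw [List.getElem_cons_zero]
      rw [rankFold_not_mem xs _ _ x (by simp at hnd; exact hnd.1)]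
      rw [PySem.Dict.getD_insert_self]
      simp
    | succ r' =>
      rw [List.getElem_cons_succ]
      rw [ih (by simp at hnd; exact hnd.2) _ (s+1) r' (by simpa using hr)]
      push_cast
      ring

theorem rankD_getD (tL : List Char) (i : Nat) (hi : i < tL.length) :
    (rankD tL).getD (i : Int) 0 = (rankOf tL i : Int) := by
  have hlt : rankOf tL i < (saB tL).length := by rw [length_saB]; exact rankOf_lt tL i hi
  have he : (saB tL)[rankOf tL i]'hlt = (i : Int) := by
    rw [saB_getElem tL _ (rankOf_lt tL i hi), saPos_rankOf tL i hi]
  have h2 := rankFold_getElem (saB tL) (nodup_sa tL) PySem.Dict.empty 0 (rankOf tL i) hlt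
  rw [he] at h2
  unfold rankD
  rw [h2]
  ring

-- ---- the Kasai loop invariant ----
theorem kasaiG_zero (tL : List Char) : kasaiG tL 0 = ((0 : Int), PySem.Dict.empty) := by
  rw [kasaiG, PySem.List.pyRange_one_eq_nil (by omega)]
  rfl

theorem kasai_inv (tL : List Char) (m : Nat) (hm : m ≤ tL.length) :
    0 ≤ (kasaiG tL m).1 ∧
    (m < tL.length → 1 ≤ rankOf tL m → (kasaiG tL m).1 ≤ (lcpAt tL (rankOf tL m) : Int)) ∧
    (∀ r : Nat, 1 ≤ r → r < tL.length →
      (kasaiG tL m).2.getD (r : Int) 0 = if saPos tL r < m then (lcpAt tL r : Int) else 0) := by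
  induction m with
  | zero =>
    refine ⟨by rw [kasaiG_zero], fun _ _ => by rw [kasaiG_zero]; exact Int.natCast_nonneg _, ?_⟩
    intro r h1 hr
    rw [kasaiG_zero, if_neg (by omega)]
    exact PySem.Dict.getD_empty _ _
  | succ m ih =>
    have hmN : m < tL.length := by omega
    obtain ⟨ih0, ih1, ih2⟩ := ih (by omega)
    have hsnoc : kasaiG tL (m + 1) = kasaiF tL (kasaiG tL m) (m : Int) := by
      rw [kasaiG, kasaiG, show ((m + 1 : Nat) : Int) = (m : Int) + 1 by push_cast; ring,
          PySem.List.pyRange_one_succ_right (by positivity), List.foldl_append]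
      rfl
    by_cases hr0 : 1 ≤ rankOf tL m
    · -- the branch that computes the lcp and inserts it
      have hstep : kasaiF tL (kasaiG tL m) (m : Int)
          = (if 0 < ((lcpAt tL (rankOf tL m) : Nat) : Int)
               then ((lcpAt tL (rankOf tL m) : Nat) : Int) - 1
               else ((lcpAt tL (rankOf tL m) : Nat) : Int),
             (kasaiG tL m).2.insert ((rankOf tL m : Nat) : Int) ((lcpAt tL (rankOf tL m) : Nat) : Int)) := by
        simp only [kasaiF]
        rw [rankD_getD tL m hmN]
        rw [if_pos (by exact_mod_cast hr0)]
        have hj : ((rankOf tL m : Nat) : Int) - 1 = ((rankOf tL m - 1 : Nat) : Int) := by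
          push_cast [hr0]; ring
        rw [hj, pyGetD_saB tL (rankOf tL m - 1) (by have := rankOf_lt tL m hmN; omega)]
        have hcomm : lcpAt tL (rankOf tL m)
            = commonLenAux (tL.drop m) (tL.drop (saPos tL (rankOf tL m - 1))) := by
          rw [lcpAt, saPos_rankOf tL m hmN, clen_comm]
        have h1 := ih1 hmN hr0
        have hext : kasaiExtend tL ((m : Nat) : Int) ((saPos tL (rankOf tL m - 1) : Nat) : Int)
            (kasaiG tL m).1 = ((lcpAt tL (rankOf tL m) : Nat) : Int) := by
          rw [show (kasaiG tL m).1 = (((kasaiG tL m).1.toNat : Nat) : Int) by omega]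
          rw [kasaiExtend_eq tL m (saPos tL (rankOf tL m - 1)) (kasaiG tL m).1.toNat
            (by rw [← hcomm]; omega)]
          rw [← hcomm]
        rw [hext]
      rw [hsnoc, hstep]
      refine ⟨?_, ?_, ?_⟩
      · dsimp only
        split_ifs with h <;> omega
      · intro hm1 hrm1
        dsimp only
        have hkey := kasai_key tL m hm1 hr0 hrm1
        split_ifs with h <;> omega
      · intro r h1 hr
        dsimp only
        rw [PySem.Dict.getD_insert]
        by_cases heq : r = rankOf tL m
        · subst heq
          rw [if_pos rfl, if_pos (by rw [saPos_rankOf tL m hmN]; omega)]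
        · rw [if_neg (by exact_mod_cast heq)]
          rw [ih2 r h1 hr]
          have hne : saPos tL r ≠ m := by
            intro h
            apply heq
            have := congrArg (rankOf tL) h
            rwa [rankOf_saPos tL r hr] at this
          by_cases hlt : saPos tL r < m
          · rw [if_pos hlt, if_pos (by omega)]
          · rw [if_neg hlt, if_neg (by omega)]
    · -- rank 0: reset h, no insert
      have hstep : kasaiF tL (kasaiG tL m) (m : Int) = ((0 : Int), (kasaiG tL m).2) := by
        simp only [kasaiF]
        rw [rankD_getD tL m hmN]
        rw [if_neg (by omega)]
      rw [hsnoc, hstep]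
      refine ⟨le_rfl, fun _ _ => Int.natCast_nonneg _, ?_⟩
      intro r h1 hr
      dsimp only
      rw [ih2 r h1 hr]
      have hne : saPos tL r ≠ m := by
        intro h
        have := congrArg (rankOf tL) h
        rw [rankOf_saPos tL r hr] at this
        omega
      by_cases hlt : saPos tL r < m
      · rw [if_pos hlt, if_pos (by omega)]
      · rw [if_neg hlt, if_neg (by omega)]

theorem any_pyRange0_iff (b : Int) (f : Int → Bool) :
    ((PySem.List.pyRange 0 b 1).any f = true) ↔ ∃ m : Nat, (m : Int) < b ∧ f m = true := by
  rw [List.any_eq_true]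
  constructor
  · rintro ⟨x, hx, hf⟩
    rw [PySem.List.mem_pyRange_one] at hx
    refine ⟨x.toNat, by omega, ?_⟩
    rwa [Int.toNat_of_nonneg hx.1]
  · rintro ⟨m, hm, hf⟩
    exact ⟨m, by rw [PySem.List.mem_pyRange_one]; omega, hf⟩

theorem any_pyRange1_iff (b : Int) (f : Int → Bool) :
    ((PySem.List.pyRange 1 b 1).any f = true) ↔
      ∃ m : Nat, 1 ≤ m ∧ (m : Int) < b ∧ f m = true := by
  rw [List.any_eq_true]
  constructor
  · rintro ⟨x, hx, hf⟩
    rw [PySem.List.mem_pyRange_one] at hx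
    refine ⟨x.toNat, by omega, by omega, ?_⟩
    rwa [Int.toNat_of_nonneg (by omega)]
  · rintro ⟨m, hm1, hm, hf⟩
    exact ⟨m, by rw [PySem.List.mem_pyRange_one]; omega, hf⟩

theorem map_sfxs (tL : List Char) :
    (PySem.List.pyRange 0 (tL.length : Int) 1).map
      (fun i => (PySem.List.slice tL (some i) none, i)) = sfxs tL := by
  simp [PySem.List.pyRange_one, sfxs, List.map_map, Function.comp]

-- the common reformulation both programs are shown to compute
def CritR (tL : List Char) (k : Int) (r : Nat) : Prop :=
  1 ≤ r ∧ r < tL.length ∧ k ≤ ((lcpAt tL r : Nat) : Int) ∧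
    ((saPos tL (r-1) : Int) - (saPos tL r : Int)).natAbs = lcpAt tL r

theorem pyGetD_Ssort (tL : List Char) (r : Nat) (hr : r < tL.length) :
    PySem.List.pyGetD (Ssort tL) (r : Int) ([], 0) = (tL.drop (saPos tL r), (saPos tL r : Int)) := by
  rw [PySem.List.pyGetD_natCast,
      List.getD_eq_getElem _ _ (by rw [length_Ssort]; exact hr), Ssort_getElem tL r hr]

theorem A_iff (tL : List Char) (k : Int) :
    ((PySem.List.pyRange 0 ((tL.length : Int) - 1) 1).any (fun i =>
      decide (k ≤ ((commonLenAux (PySem.List.pyGetD (Ssort tL) i ([], 0)).1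
                      (PySem.List.pyGetD (Ssort tL) (i+1) ([], 0)).1 : Nat) : Int) ∧
        ((PySem.List.pyGetD (Ssort tL) i ([], 0)).2
            - (PySem.List.pyGetD (Ssort tL) (i+1) ([], 0)).2).natAbs
          = commonLenAux (PySem.List.pyGetD (Ssort tL) i ([], 0)).1
              (PySem.List.pyGetD (Ssort tL) (i+1) ([], 0)).1)) = true)
    ↔ ∃ r : Nat, CritR tL k r := by
  rw [any_pyRange0_iff]
  constructor
  · rintro ⟨m, hm, hf⟩
    have hmN : m + 1 < tL.length := by omega
    rw [show ((m : Int) + 1) = ((m + 1 : Nat) : Int) by push_cast; ring,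
        pyGetD_Ssort tL m (by omega), pyGetD_Ssort tL (m+1) hmN, decide_eq_true_eq] at hf
    refine ⟨m + 1, by omega, hmN, ?_, ?_⟩
    · have : lcpAt tL (m+1) = commonLenAux (tL.drop (saPos tL m)) (tL.drop (saPos tL (m+1))) := by
        rw [lcpAt]
        congr 1
      rw [this]
      exact hf.1
    · have h2 := hf.2
      rw [lcpAt]
      simpa using h2
  · rintro ⟨r, hr1, hrN, hk, habs⟩
    refine ⟨r - 1, by omega, ?_⟩
    rw [show ((r - 1 : Nat) : Int) + 1 = ((r : Nat) : Int) by push_cast [hr1]; ring,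
        pyGetD_Ssort tL (r-1) (by omega), pyGetD_Ssort tL r hrN, decide_eq_true_eq]
    constructor
    · rw [← lcpAt]
      exact hk
    · rw [← lcpAt]
      simpa using habs

theorem B_iff (tL : List Char) (k : Int) :
    ((PySem.List.pyRange 1 (tL.length : Int) 1).any (fun r =>
      decide (k ≤ (kasaiG tL tL.length).2.getD r 0 ∧
        (((PySem.List.pyGetD (saB tL) r 0 - PySem.List.pyGetD (saB tL) (r - 1) 0).natAbs : Nat) : Int)
          = (kasaiG tL tL.length).2.getD r 0)) = true)
    ↔ ∃ r : Nat, CritR tL k r := by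
  rw [any_pyRange1_iff]
  have hdict := (kasai_inv tL tL.length le_rfl).2.2
  constructor
  · rintro ⟨r, hr1, hrN, hf⟩
    have hrN' : r < tL.length := by omega
    rw [hdict r hr1 hrN', if_pos (saPos_lt tL r hrN'),
        show ((r : Int) - 1) = ((r - 1 : Nat) : Int) by push_cast [hr1]; ring,
        pyGetD_saB tL r hrN', pyGetD_saB tL (r-1) (by omega), decide_eq_true_eq] at hf
    refine ⟨r, hr1, hrN', hf.1, ?_⟩
    have h2 := hf.2
    omega
  · rintro ⟨r, hr1, hrN, hk, habs⟩
    refine ⟨r, hr1, by exact_mod_cast hrN, ?_⟩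
    rw [hdict r hr1 hrN, if_pos (saPos_lt tL r hrN),
        show ((r : Int) - 1) = ((r - 1 : Nat) : Int) by push_cast [hr1]; ring,
        pyGetD_saB tL r hrN, pyGetD_saB tL (r-1) (by omega), decide_eq_true_eq]
    refine ⟨hk, ?_⟩
    omega

-- ===== VERDICT (by name: the statement is the Claim_ definition above) =====
theorem has_consecutive_repetition_spec : Claim_equal_has_consecutive_repetition := by
  intro text k _
  unfold Spec_has_consecutive_repetition has_consecutive_repetition has_consecutive_repetition_alt
  simp only []
  by_cases hg : ((text.toList.length : Int) < 2 * k)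
  · rw [if_pos hg, if_pos hg]
  · rw [if_neg hg, if_neg hg]
    simp only [map_sfxs, sorted2_eq_Ssort, sa_eq]
    rw [show ∀ (a b : Bool), a = b ↔ (a = true ↔ b = true) from by decide]
    exact (A_iff text.toList k).trans (B_iff text.toList k).symm
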